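-- pv_equiv track=rewrite | github.com/bg-93/prosperity-4-forgetful-functors | src/algorithms/round1/r1momentumV2.py | hit_bids_to_exit
-- ===== SOURCE A (Python) =====
-- def hit_bids_to_exit(buy_orders: list[tuple[int, int]], max_qty: int, limit_price: int) -> list[tuple[int, int]]:
--     fills: list[tuple[int, int]] = []
--     remaining = max_qty
--
--     for bid_price, bid_vol in buy_orders:
--         available = abs(bid_vol)
--         if remaining <= 0:
--             break
--         if bid_price >= limit_price:
--             qty = min(remaining, available)
--             if qty > 0:
--                 fills.append((bid_price, qty))
--                 remaining -= qty
--
--     return fills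
-- ===== SOURCE B (Python) =====
-- def hit_bids_to_exit(buy_orders: list[tuple[int, int]], max_qty: int, limit_price: int) -> list[tuple[int, int]]:
--     if max_qty <= 0:
--         return []
--     # pass 1: qualifying bids with absolute volumes
--     qualifying = [(p, abs(v)) for p, v in buy_orders if p >= limit_price]
--     # pass 2: cumulative available volume table
--     cum = []
--     total = 0
--     for p, a in qualifying:
--         total += a
--         cum.append((p, a, total))
--     # pass 3: walk the prefix table, capping at max_qty
--     fills = []
--     for p, a, t in cum:
--         before = t - a
--         if before >= max_qty:
--             break
--         qty = min(a, max_qty - before)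
--         if qty > 0:
--             fills.append((p, qty))
--     return fills
-- ===== Notes on version B (the rewrite author's own statement) =====
-- stated objective: alternative
-- what changed: Replaces the single accumulating loop with a 'remaining' counter by a three-pass pipeline: filter qualifying bids, build a cumulative-volume prefix table, then walk the table capping each fill at max_qty minus the volume already before it.
import Mathlib
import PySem

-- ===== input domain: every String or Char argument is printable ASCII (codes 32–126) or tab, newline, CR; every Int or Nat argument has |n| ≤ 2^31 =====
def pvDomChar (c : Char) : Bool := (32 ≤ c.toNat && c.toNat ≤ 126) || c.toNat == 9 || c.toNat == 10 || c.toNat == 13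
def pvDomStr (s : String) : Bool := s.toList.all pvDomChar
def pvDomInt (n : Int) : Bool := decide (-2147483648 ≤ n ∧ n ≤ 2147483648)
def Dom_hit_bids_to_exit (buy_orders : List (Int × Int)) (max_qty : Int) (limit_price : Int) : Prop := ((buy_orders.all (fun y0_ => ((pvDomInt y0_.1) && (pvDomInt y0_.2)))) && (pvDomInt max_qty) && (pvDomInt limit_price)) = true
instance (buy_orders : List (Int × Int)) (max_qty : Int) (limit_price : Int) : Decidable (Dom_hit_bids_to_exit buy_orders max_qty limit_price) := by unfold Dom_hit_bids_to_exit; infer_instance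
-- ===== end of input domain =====

-- ===== PORT A =====
-- greedy loop carrying `remaining`; returns early ([] tail) when remaining <= 0, like Python's break
def hitA : List (Int × Int) → Int → Int → List (Int × Int)
  | [], _, _ => []
  | (bid_price, bid_vol) :: rest, remaining, limit_price =>
    let available := |bid_vol|
    if remaining ≤ 0 then []
    else if bid_price ≥ limit_price then
      let qty := min remaining available
      if qty > 0 then (bid_price, qty) :: hitA rest (remaining - qty) limit_price
      else hitA rest remaining limit_price
    else hitA rest remaining limit_price

def hit_bids_to_exit (buy_orders : List (Int × Int)) (max_qty : Int) (limit_price : Int) : List (Int × Int) :=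
  hitA buy_orders max_qty limit_price

-- ===== PORT B =====
-- pass 2 of Source B: cumulative available volume table
def cumB : List (Int × Int) → Int → List (Int × Int × Int)
  | [], _ => []
  | (p, a) :: rest, total => (p, a, total + a) :: cumB rest (total + a)

-- pass 3 of Source B: walk the prefix table, capping at max_qty ([] tail = Python's break)
def walkB (max_qty : Int) : List (Int × Int × Int) → List (Int × Int)
  | [] => []
  | (p, a, t) :: rest =>
    let before := t - a
    if before ≥ max_qty then []
    else
      let qty := min a (max_qty - before)
      if qty > 0 then (p, qty) :: walkB max_qty rest
      else walkB max_qty rest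

def hit_bids_to_exit_alt (buy_orders : List (Int × Int)) (max_qty : Int) (limit_price : Int) : List (Int × Int) :=
  if max_qty ≤ 0 then []
  else
    let qualifying := (buy_orders.filter (fun pv => pv.1 ≥ limit_price)).map (fun pv => (pv.1, |pv.2|))
    walkB max_qty (cumB qualifying 0)

-- ===== PRECONDITION & SPEC =====
def Spec_hit_bids_to_exit (buy_orders : List (Int × Int)) (max_qty : Int) (limit_price : Int) (out : List (Int × Int)) : Prop := out = hit_bids_to_exit_alt buy_orders max_qty limit_price
instance (buy_orders : List (Int × Int)) (max_qty : Int) (limit_price : Int) (out : List (Int × Int)) : Decidable (Spec_hit_bids_to_exit buy_orders max_qty limit_price out) := by unfold Spec_hit_bids_to_exit; infer_instance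

-- ===== CLAIM (what is proved, stated in full; the proofs are below) =====
def Claim_equal_hit_bids_to_exit : Prop := ∀ (buy_orders : List (Int × Int)) (max_qty : Int) (limit_price : Int), Dom_hit_bids_to_exit buy_orders max_qty limit_price → Spec_hit_bids_to_exit buy_orders max_qty limit_price (hit_bids_to_exit buy_orders max_qty limit_price)

-- ===== LEMMAS AND PROOFS =====
-- proof helper: A's loop restricted to the (already filtered, abs-mapped) qualifying list
def walkQ : List (Int × Int) → Int → List (Int × Int)
  | [], _ => []
  | (p, a) :: rest, rem =>
    if rem ≤ 0 then []
    else
      let qty := min rem a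
      if qty > 0 then (p, qty) :: walkQ rest (rem - qty)
      else walkQ rest rem

lemma walkQ_nonpos (qs : List (Int × Int)) (rem : Int) (h : rem ≤ 0) : walkQ qs rem = [] := by
  cases qs with
  | nil => rfl
  | cons x rest => cases x; simp [walkQ, h]

lemma hitA_eq_walkQ (bo : List (Int × Int)) (rem lp : Int) :
    hitA bo rem lp = walkQ ((bo.filter (fun pv => pv.1 ≥ lp)).map (fun pv => (pv.1, |pv.2|))) rem := by
  induction bo generalizing rem with
  | nil => rfl
  | cons x rest ih =>
    obtain ⟨p, v⟩ := x
    by_cases hq : p ≥ lp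
    · by_cases hr : rem ≤ 0
      · simp [hitA, hq, hr, walkQ]
      · simp only [hitA, walkQ, List.filter_cons, List.map_cons, hq, hr, decide_true,
          if_true, if_false]
        by_cases hc : min rem |v| > 0
        · simp only [if_pos hc]; rw [ih]
        · simp only [if_neg hc]; exact ih _
    · by_cases hr : rem ≤ 0
      · simp [hitA, hr, hq, walkQ_nonpos _ _ hr]
      · simp [hitA, hr, hq, ih]

lemma walkB_saturated (mq : Int) (qs : List (Int × Int)) (total : Int) (h : total ≥ mq) :
    walkB mq (cumB qs total) = [] := by
  cases qs with
  | nil => rfl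
  | cons x rest =>
    obtain ⟨p, a⟩ := x
    simp [cumB, walkB, h]

lemma walkB_eq_walkQ (mq : Int) (qs : List (Int × Int)) (total : Int)
    (hnn : ∀ x ∈ qs, 0 ≤ x.2) :
    walkB mq (cumB qs total) = walkQ qs (mq - total) := by
  induction qs generalizing total with
  | nil => rfl
  | cons x rest ih =>
    obtain ⟨p, a⟩ := x
    have ha : 0 ≤ a := hnn (p, a) (by simp)
    have hnn' : ∀ x ∈ rest, 0 ≤ x.2 := fun x hx => hnn x (by simp [hx])
    by_cases hr : mq - total ≤ 0
    · have : total ≥ mq := by omega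
      rw [walkB_saturated mq _ total this, walkQ_nonpos _ _ hr]
    · have hbefore : ¬ (total + a - a ≥ mq) := by omega
      have hmin : min a (mq - total) = min (mq - total) a := min_comm _ _
      simp only [cumB, walkB, hbefore, walkQ, if_neg hr]
      rw [show total + a - a = total by ring, hmin]
      by_cases hq : min (mq - total) a > 0
      · simp only [if_pos hq]
        by_cases hle : a ≤ mq - total
        · have hqa : min (mq - total) a = a := by omega
          rw [hqa]
          have := ih (total + a) hnn'
          rw [this, show mq - (total + a) = mq - total - a by ring]
          simp
        · have hqa : min (mq - total) a = mq - total := by omega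
          rw [hqa]
          have h1 : walkB mq (cumB rest (total + a)) = [] :=
            walkB_saturated mq rest (total + a) (by omega)
          have h2 : walkQ rest (mq - total - (mq - total)) = [] :=
            walkQ_nonpos _ _ (by omega)
          rw [h1, h2]
          simp
      · have haz : a = 0 := by omega
        simp only [if_neg hq]
        have := ih (total + a) hnn'
        rw [this, haz]
        simp

-- ===== VERDICT (by name: the statement is the Claim_ definition above) =====
theorem hit_bids_to_exit_spec : Claim_equal_hit_bids_to_exit := by
  intro bo mq lp _
  unfold Spec_hit_bids_to_exit hit_bids_to_exit hit_bids_to_exit_alt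
  by_cases hmq : mq ≤ 0
  · rw [if_pos hmq, hitA_eq_walkQ, walkQ_nonpos _ _ hmq]
  · rw [if_neg hmq, hitA_eq_walkQ,
      walkB_eq_walkQ mq _ 0 (by
        intro x hx
        simp only [List.mem_map] at hx
        obtain ⟨y, -, rfl⟩ := hx
        exact abs_nonneg _)]
    simp
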